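-- pv_equiv track=rewrite | github.com/angelo-kevin/soalsoal | isogram.py | checkIsogram
-- ===== SOURCE A (Python) =====
-- def checkIsogram(a):
--     a = a.lower()
--     tempSet = set()
--     for i in a:
--         if i in tempSet:
--             return False
--         else:
--             tempSet.add(i)
--     return True
-- ===== SOURCE B (Python) =====
-- def checkIsogram(a):
--     s = sorted(a.lower())
--     return all(x != y for x, y in zip(s, s[1:]))
-- ===== Notes on version B (the rewrite author's own statement) =====
-- stated objective: alternative
-- what changed: Replaces A's incremental hash-set scan with early return by sort-then-adjacent-scan: sort the lowered characters and check that no two neighbouring characters are equal (a sorted list has a duplicate iff some adjacent pair is equal), so no set is used at all.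
import Mathlib
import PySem

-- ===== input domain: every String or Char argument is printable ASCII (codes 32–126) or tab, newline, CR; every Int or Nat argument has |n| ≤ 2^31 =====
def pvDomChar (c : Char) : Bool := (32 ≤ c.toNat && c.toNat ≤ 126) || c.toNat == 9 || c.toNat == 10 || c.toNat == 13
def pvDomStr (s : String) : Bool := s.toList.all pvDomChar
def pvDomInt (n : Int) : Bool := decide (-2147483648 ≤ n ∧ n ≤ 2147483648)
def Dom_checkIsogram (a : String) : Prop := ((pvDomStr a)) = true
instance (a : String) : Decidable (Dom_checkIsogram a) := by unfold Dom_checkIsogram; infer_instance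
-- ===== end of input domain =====

-- B replaces A's incremental-set scan (early return on a repeated character) by sort-then-adjacent-scan: sort the lowered characters and check no two neighbours are equal; alternative algorithm, no set at all.


-- ===== PORT A =====
-- the for-loop with early 'return False' over the lowered string, carrying tempSet
def checkIsogramLoop : List Char → PySem.Set Char → Bool
  | [], _ => true
  | i :: rest, tempSet =>
      if PySem.Set.contains tempSet i then false
      else checkIsogramLoop rest (PySem.Set.add tempSet i)

def checkIsogram (a : String) : Bool :=
  checkIsogramLoop (PySem.Str.lower a).toList PySem.Set.empty

-- ===== PORT B =====
-- s = sorted(a.lower()); all(x != y for x, y in zip(s, s[1:]))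
def checkIsogram_alt (a : String) : Bool :=
  let s := PySem.List.sorted (PySem.Str.lower a).toList (fun x => x) false
  (s.zip (PySem.List.slice s (some 1) none)).all (fun p => p.1 != p.2)

-- ===== PRECONDITION & SPEC =====
def Spec_checkIsogram (a : String) (out : Bool) : Prop := out = checkIsogram_alt a
instance (a : String) (out : Bool) : Decidable (Spec_checkIsogram a out) := by unfold Spec_checkIsogram; infer_instance

-- ===== CLAIM =====
def Claim_equal_checkIsogram : Prop := ∀ (a : String), Dom_checkIsogram a → Spec_checkIsogram a (checkIsogram a)

-- ===== LEMMAS AND PROOFS =====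

-- A's loop decides "xs has no repeats and avoids the accumulated set"
theorem loop_eq (xs : List Char) (s : PySem.Set Char) :
    checkIsogramLoop xs s = decide (xs.Nodup ∧ ∀ x ∈ xs, x ∉ s) := by
  induction xs generalizing s with
  | nil => simp [checkIsogramLoop]
  | cons x xs ih =>
      rw [checkIsogramLoop]
      by_cases hm : x ∈ s
      · rw [if_pos (by simp [PySem.Set.contains, hm])]
        symm
        rw [decide_eq_false_iff_not]
        rintro ⟨-, hav⟩
        exact hav x (by simp) hm
      · have hadd : PySem.Set.add s x = s ++ [x] := by
          simp [PySem.Set.add, PySem.Set.contains, hm]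
        rw [if_neg (by simp [PySem.Set.contains, hm]), ih, hadd]
        simp only [List.nodup_cons, List.mem_cons, List.mem_append, decide_eq_decide]
        constructor
        · rintro ⟨hn, hav⟩
          refine ⟨⟨fun hx => ?_, hn⟩, ?_⟩
          · have := hav x hx
            simp at this
          · rintro y (rfl | hy) hys
            · exact hm hys
            · have := hav y hy
              simp at this
              exact this.1 hys
        · rintro ⟨⟨hxnot, hn⟩, hav⟩
          refine ⟨hn, fun y hy hmem => ?_⟩
          simp at hmem
          rcases hmem with h1 | rfl
          · exact hav y (Or.inr hy) h1
          · exact hxnot hy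

-- on a ≤-sorted list, "no two adjacent elements equal" decides Nodup
theorem adjAll_iff (s : List Char) (hp : s.Pairwise (· ≤ ·)) :
    ((s.zip s.tail).all (fun p => p.1 != p.2) = true) ↔ s.Nodup := by
  induction s with
  | nil => simp
  | cons x t ih =>
      cases t with
      | nil => simp
      | cons y u =>
          have hp' : (y :: u).Pairwise (· ≤ ·) := hp.tail
          have hxle : ∀ z ∈ y :: u, x ≤ z := fun z hz => (List.pairwise_cons.mp hp).1 z hz
          have hyle : ∀ z ∈ u, y ≤ z := fun z hz => (List.pairwise_cons.mp hp').1 z hz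
          constructor
          · intro hall
            simp only [List.tail_cons, List.zip_cons_cons, List.all_cons, Bool.and_eq_true,
              bne_iff_ne, ne_eq] at hall
            obtain ⟨hxy, hrest⟩ := hall
            have hnt : (y :: u).Nodup := (ih hp').mp (by
              simpa [List.all_eq_true] using hrest)
            have hxlt : x < y := lt_of_le_of_ne (hxle y (by simp)) hxy
            refine List.nodup_cons.mpr ⟨?_, hnt⟩
            intro hx
            rcases List.mem_cons.mp hx with rfl | hxu
            · exact hxy rfl
            · exact absurd (lt_of_lt_of_le hxlt (hyle x hxu)) (lt_irrefl x)
          · intro hnd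
            have hnt := (List.nodup_cons.mp hnd).2
            have hxny : x ≠ y := fun h => (List.nodup_cons.mp hnd).1 (h ▸ by simp)
            simp only [List.tail_cons, List.zip_cons_cons, List.all_cons, Bool.and_eq_true,
              bne_iff_ne, ne_eq]
            exact ⟨hxny, (ih hp').mpr hnt⟩

-- ===== VERDICT =====
theorem checkIsogram_spec : Claim_equal_checkIsogram := by
  intro a _
  show checkIsogram a = checkIsogram_alt a
  unfold checkIsogram checkIsogram_alt
  simp only [loop_eq, PySem.List.slice_from_one]
  have hperm : (PySem.List.sorted (PySem.Str.lower a).toList (fun x => x) false).Perm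
      (PySem.Str.lower a).toList := PySem.List.sorted_perm _ _ _
  have hpair : (PySem.List.sorted (PySem.Str.lower a).toList (fun x => x) false).Pairwise
      (· ≤ ·) := by simpa using PySem.List.sorted_pairwise (PySem.Str.lower a).toList (fun x => x)
  have hiff := adjAll_iff _ hpair
  have hnd : (PySem.Str.lower a).toList.Nodup ↔
      (PySem.List.sorted (PySem.Str.lower a).toList (fun x => x) false).Nodup :=
    (hperm.nodup_iff).symm
  by_cases h : (PySem.Str.lower a).toList.Nodup
  · rw [hiff.mpr (hnd.mp h)]
    have h' : (PySem.Chars.lower a.toList).Nodup := by simpa using h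
    simp [PySem.Set.empty, h']
  · have hfalse : ((PySem.List.sorted (PySem.Str.lower a).toList (fun x => x) false).zip
        (PySem.List.sorted (PySem.Str.lower a).toList (fun x => x) false).tail).all
        (fun p => p.1 != p.2) = false := by
      rw [Bool.eq_false_iff]
      exact fun hh => h (hnd.mpr (hiff.mp hh))
    rw [hfalse]
    have h' : ¬ (PySem.Chars.lower a.toList).Nodup := fun hh => h (by simpa using hh)
    simp [PySem.Set.empty, h']
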